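-- pv_equiv track=rewrite | github.com/FitSNAP/FitSNAP | examples/library/genetic_algorithm/libmod_optimize.py | assign_ranks
-- ===== SOURCE A (Python) =====
-- def assign_ranks(population0, ncores):
--     """
--     Sort GA populations into indexed lists used in MPI communication. Works the same in serial mode.
--
--     Args:
--         population0: an initial list of creatures with weights
--         ncores: number of cores used to run GA
--
--     Returns:
--         population: a list of lists containing the number of creatures to calculate per core
--         pop_indices: helper list with the same structure as population that tracks the serial indices of each creature
--     """
--     population = [[] for _ in range(ncores)]
--     pop_indices = [[] for _ in range(ncores)]
--     for i, creature in enumerate(population0):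
--         # assign creatures alternating cores
--         rank_i = i % ncores
--         population[rank_i].append(creature)
--         pop_indices[rank_i].append(i)
--
--     return population, pop_indices
-- ===== SOURCE B (Python) =====
-- def assign_ranks(population0, ncores):
--     """Round-robin distribution built per core: validate the core count, then
--     take every ncores-th creature starting at r for each core r."""
--     if ncores < 1:
--         raise ValueError("ncores must be a positive integer")
--     n = len(population0)
--     population = [[population0[j] for j in range(r, n, ncores)] for r in range(ncores)]
--     pop_indices = [list(range(r, n, ncores)) for r in range(ncores)]
--     return population, pop_indices
-- ===== Notes on version B (the rewrite author's own statement) =====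
-- stated objective: idiomatic
-- what changed: Reverses the nesting: instead of a single pass dispatching each creature to bucket i % ncores, B validates ncores and builds each core's bucket directly with a strided range(r, len, ncores) per core.
-- outside the precondition, e.g. on assign_ranks([], 0): A returns ([], []), B raises ValueError
import Mathlib
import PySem

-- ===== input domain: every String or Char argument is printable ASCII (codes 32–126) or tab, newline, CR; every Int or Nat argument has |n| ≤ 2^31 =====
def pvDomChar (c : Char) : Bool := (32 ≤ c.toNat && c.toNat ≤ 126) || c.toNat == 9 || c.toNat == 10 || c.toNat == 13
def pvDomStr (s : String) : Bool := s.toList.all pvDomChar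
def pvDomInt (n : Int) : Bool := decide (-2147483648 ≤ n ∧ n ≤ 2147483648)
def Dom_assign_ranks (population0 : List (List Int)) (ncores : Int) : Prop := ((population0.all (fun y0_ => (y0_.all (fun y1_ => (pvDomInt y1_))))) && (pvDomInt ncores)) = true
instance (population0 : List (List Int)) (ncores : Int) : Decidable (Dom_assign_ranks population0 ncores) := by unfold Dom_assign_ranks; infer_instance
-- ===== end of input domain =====

-- B validates the core count and then builds each core's bucket directly with a
-- strided range per core (idiomatic reversed nesting) instead of A's
-- element-by-element dispatch via i % ncores.

-- ===== PORT A =====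
-- loop body of A's for-loop (one enumerate step); the `none` arms are where the
-- Python raises (ZeroDivisionError for ncores = 0, IndexError for ncores < 0),
-- which Pre_assign_ranks excludes
def arStep (ncores : Int) (st : List (List (List Int)) × List (List Int))
    (p : Int × List Int) : List (List (List Int)) × List (List Int) :=
  match PySem.Int.mod? p.1 ncores with
  | none => st
  | some rank_i =>
    match PySem.List.pyIdx? st.1.length rank_i with
    | none => st
    | some j => (st.1.modify j (· ++ [p.2]), st.2.modify j (· ++ [p.1]))

def assign_ranks (population0 : List (List Int)) (ncores : Int) :
    List (List (List Int)) × List (List Int) :=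
  (PySem.List.enumerate population0 0).foldl (arStep ncores)
    ((PySem.List.pyRange 0 ncores 1).map (fun _ => []),
     (PySem.List.pyRange 0 ncores 1).map (fun _ => []))

-- ===== PORT B =====
-- the per-core build after the validation guard; population0[j] is ported with
-- pyGetD: every j drawn from range(r, n, ncores) with 0 ≤ r satisfies
-- 0 ≤ j < n, so the index is always in range in Python too
def arBuild (population0 : List (List Int)) (ncores : Int) :
    List (List (List Int)) × List (List Int) :=
  let n : Int := (population0.length : Int)
  ((PySem.List.pyRange 0 ncores 1).map (fun r =>
      (PySem.List.pyRange r n ncores).map (fun j => PySem.List.pyGetD population0 j [])),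
   (PySem.List.pyRange 0 ncores 1).map (fun r => PySem.List.pyRange r n ncores))

-- Source B raises ValueError when ncores < 1 (outside Pre_assign_ranks); the port
-- returns ([], []) on that unclaimed region
def assign_ranks_alt (population0 : List (List Int)) (ncores : Int) :
    List (List (List Int)) × List (List Int) :=
  if ncores < 1 then ([], [])
  else arBuild population0 ncores

-- ===== PRECONDITION & SPEC =====
-- Pre_ excludes ncores ≤ 0: there A raises except when population0 is empty
-- (where A returns ([], [])), while B's input validation raises ValueError.
def Pre_assign_ranks (population0 : List (List Int)) (ncores : Int) : Prop :=
  0 < ncores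
instance (population0 : List (List Int)) (ncores : Int) : Decidable (Pre_assign_ranks population0 ncores) := by unfold Pre_assign_ranks; infer_instance

def pvWitness_assign_ranks : List (List Int) × Int := ([[1], [2], [3]], 2)

def Spec_assign_ranks (population0 : List (List Int)) (ncores : Int) (out : List (List (List Int)) × List (List Int)) : Prop := out = assign_ranks_alt population0 ncores
instance (population0 : List (List Int)) (ncores : Int) (out : List (List (List Int)) × List (List Int)) : Decidable (Spec_assign_ranks population0 ncores out) := by unfold Spec_assign_ranks; infer_instance

-- ===== CLAIM =====
def Claim_equal_assign_ranks : Prop := ∀ (population0 : List (List Int)) (ncores : Int), Dom_assign_ranks population0 ncores → Pre_assign_ranks population0 ncores → Spec_assign_ranks population0 ncores (assign_ranks population0 ncores)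

-- ===== LEMMAS AND PROOFS =====

-- an ascending strided range with a nonnegative start and stop 0 is empty
lemma pyRange_pos_nil (r s : Int) (hs : 0 < s) (hr : 0 ≤ r) :
    PySem.List.pyRange r 0 s = [] := by
  rw [PySem.List.pyRange_of_pos _ _ hs, if_neg (by omega)]
  simp

-- extending the stop of an ascending strided range by one appends the old stop
-- exactly when it lies on the stride
lemma pyRange_snoc (r L s : Int) (hs : 0 < s) :
    PySem.List.pyRange r (L + 1) s =
      PySem.List.pyRange r L s ++ (if r ≤ L ∧ s ∣ (L - r) then [L] else []) := by
  rw [PySem.List.pyRange_of_pos _ _ hs, PySem.List.pyRange_of_pos _ _ hs]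
  rcases lt_trichotomy (L - r) 0 with hneg | hzero | hpos
  · rw [if_neg (by omega), if_neg (by omega), if_neg (by omega)]
    simp
  · rw [if_pos (by omega), if_neg (by omega), if_pos ⟨by omega, by simp [hzero]⟩]
    have h1 : L + 1 - r + s - 1 = s := by omega
    rw [h1, Int.ediv_self (by omega)]
    simp [List.range_one]
    omega
  · obtain ⟨q, t, hqt, ht0, hts, hq0⟩ :
        ∃ q t, s * q + t = L - r ∧ 0 ≤ t ∧ t < s ∧ 0 ≤ q :=
      ⟨(L - r) / s, (L - r) % s, Int.ediv_add_emod _ _, Int.emod_nonneg _ (by omega),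
        Int.emod_lt_of_pos _ hs, Int.ediv_nonneg (by omega) (by omega)⟩
    have hc2 : (L + 1 - r + s - 1) / s = q + 1 := by
      have h1 : L + 1 - r + s - 1 = t + (q + 1) * s := by ring_nf; ring_nf at hqt; linarith [hqt]
      rw [h1, Int.add_mul_ediv_right _ _ (by omega), Int.ediv_eq_zero_of_lt (by omega) (by omega)]
      omega
    rw [if_pos (by omega), if_pos (by omega), hc2]
    by_cases hdv : s ∣ (L - r)
    · have htz : t = 0 := by
        obtain ⟨c, hc⟩ := hdv
        have h4 : t = s * (c - q) := by ring_nf; ring_nf at hqt hc; linarith [hqt, hc]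
        rcases (by omega : c - q < 0 ∨ c - q = 0 ∨ 0 < c - q) with h | h | h
        · nlinarith
        · simp [h] at h4; omega
        · nlinarith
      have hc1 : (L - r + s - 1) / s = q := by
        have h1 : L - r + s - 1 = (s - 1) + q * s := by ring_nf; ring_nf at hqt; linarith [hqt]
        rw [h1, Int.add_mul_ediv_right _ _ (by omega), Int.ediv_eq_zero_of_lt (by omega) (by omega)]
        omega
      have h2 : (q + 1).toNat = q.toNat + 1 := by omega
      rw [if_pos ⟨by omega, hdv⟩, hc1, h2, List.range_succ, List.map_append]
      simp
      rw [max_eq_left hq0]; linarith [hqt]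
    · have htz : t ≠ 0 := by
        intro h; exact hdv ⟨q, by linarith [hqt]⟩
      have hc1 : (L - r + s - 1) / s = q + 1 := by
        have h1 : L - r + s - 1 = (t - 1) + (q + 1) * s := by ring_nf; ring_nf at hqt; linarith [hqt]
        rw [h1, Int.add_mul_ediv_right _ _ (by omega), Int.ediv_eq_zero_of_lt (by omega) (by omega)]
        omega
      rw [if_neg (by tauto), hc1, List.append_nil]

-- the stride-membership condition characterises L % s among 0 ≤ k < s
lemma cond_iff (k L s : Int) (hs : 0 < s) (hk0 : 0 ≤ k) (hk : k < s) (hL : 0 ≤ L) :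
    (k ≤ L ∧ s ∣ (L - k)) ↔ k = L % s := by
  have hdvd : s ∣ (L - k) ↔ L % s = k := by
    rw [Int.dvd_iff_emod_eq_zero, ← Int.emod_eq_emod_iff_emod_sub_eq_zero,
      Int.emod_eq_of_lt hk0 hk]
  have h1 := Int.ediv_add_emod L s
  have h3 : 0 ≤ s * (L / s) := mul_nonneg (le_of_lt hs) (Int.ediv_nonneg hL (le_of_lt hs))
  constructor
  · rintro ⟨hle, hd⟩; exact (hdvd.mp hd).symm
  · rintro rfl; exact ⟨by linarith, hdvd.mpr rfl⟩

-- appending one bucket element at position (L % nc).toNat, seen as a map over the core range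
lemma modify_map_range (nc L : Int) (hn : 0 < nc) {β : Type}
    (f g : Int → List β) (a : β)
    (hg : ∀ k : Int, 0 ≤ k → k < nc → g k = f k ++ (if k = L % nc then [a] else [])) :
    ((PySem.List.pyRange 0 nc 1).map f).modify (L % nc).toNat (fun l => l ++ [a])
      = (PySem.List.pyRange 0 nc 1).map g := by
  have hm0 : 0 ≤ L % nc := Int.emod_nonneg _ (by omega)
  have hmlt : L % nc < nc := Int.emod_lt_of_pos _ hn
  apply List.ext_getElem
  · simp
  · intro k h1 h2
    simp only [List.length_modify, List.length_map, PySem.List.length_pyRange_one] at h1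
    have hk : (k : Int) < nc := by omega
    rw [List.getElem_modify]
    simp only [List.getElem_map, PySem.List.getElem_pyRange_one, zero_add]
    rw [hg k (by omega) hk]
    by_cases he : (L % nc).toNat = k
    · rw [if_pos he, if_pos (by omega)]
    · rw [if_neg he, if_neg (by omega), List.append_nil]

-- one A-step applied to B's per-core build on xs gives the build on xs ++ [x]
lemma step_snoc (nc : Int) (hn : 0 < nc) (xs : List (List Int)) (x : List Int) :
    arStep nc (arBuild xs nc) ((xs.length : Int), x)
      = arBuild (xs ++ [x]) nc := by
  have hL0 : (0 : Int) ≤ (xs.length : Int) := by positivity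
  have hm0 : 0 ≤ (xs.length : Int) % nc := Int.emod_nonneg _ (by omega)
  have hmlt : (xs.length : Int) % nc < nc := Int.emod_lt_of_pos _ hn
  have hmod : PySem.Int.mod? ((xs.length : Int)) nc = some ((xs.length : Int) % nc) := by
    have hf : Int.fmod ((xs.length : Int)) nc = (xs.length : Int) % nc := by
      rw [Int.fmod_eq_emod]; simp [le_of_lt hn]
    unfold PySem.Int.mod?
    rw [if_neg (by omega : ¬ nc = 0), hf]
  have hidx : PySem.List.pyIdx? nc.toNat ((xs.length : Int) % nc)
      = some (((xs.length : Int) % nc).toNat) := by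
    rw [PySem.List.pyIdx?, if_pos hm0, if_pos (by omega)]
  have hstop : (((xs ++ [x]).length : Int)) = (xs.length : Int) + 1 := by
    simp
  simp only [arStep, arBuild, List.length_map, PySem.List.length_pyRange_one,
    sub_zero, hidx, hmod, hstop]
  refine Prod.ext ?_ ?_
  · apply modify_map_range nc _ hn
    intro k hk0 hk
    rw [pyRange_snoc k _ nc hn, List.map_append]
    congr 1
    · apply List.map_congr_left
      intro j hj
      obtain ⟨hj1, hj2, -⟩ := (PySem.List.mem_pyRange_iff_of_pos hn j).mp hj
      have hj0 : 0 ≤ j := le_trans hk0 hj1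
      rw [PySem.List.pyGetD_eq_getElem _ _ hj0 (by simp; omega),
        PySem.List.pyGetD_eq_getElem _ _ hj0 (by omega),
        List.getElem_append_left (by omega)]
    · simp only [cond_iff k _ nc hn hk0 hk hL0]
      by_cases he : k = (xs.length : Int) % nc
      · rw [if_pos he, if_pos he]
        simp only [List.map_cons, List.map_nil]
        rw [PySem.List.pyGetD_eq_getElem _ _ hL0 (by simp)]
        congr 1
        simp [show ((xs.length : Int)).toNat = xs.length from by omega]
      · rw [if_neg he, if_neg he]; rfl
  · apply modify_map_range nc _ hn
    intro k hk0 hk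
    rw [pyRange_snoc k _ nc hn]
    simp only [cond_iff k _ nc hn hk0 hk hL0]

-- for positive ncores, A's fold over enumerate equals B's per-core build
lemma fold_eq (nc : Int) (hn : 0 < nc) (xs : List (List Int)) :
    assign_ranks xs nc = arBuild xs nc := by
  induction xs using List.reverseRecOn with
  | nil =>
    simp only [assign_ranks, arBuild, PySem.List.enumerate_nil, List.foldl_nil,
      List.length_nil, Int.natCast_zero]
    refine Prod.ext ?_ ?_ <;>
    · refine (List.map_congr_left ?_).symm
      intro r hr
      have hm := (PySem.List.mem_pyRange_one).mp hr
      simp [pyRange_pos_nil r nc hn hm.1]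
  | append_singleton xs x ih =>
    have hfold : assign_ranks (xs ++ [x]) nc
        = arStep nc (assign_ranks xs nc) ((xs.length : Int), x) := by
      simp [assign_ranks, PySem.List.enumerate_append, PySem.List.enumerate_cons,
        PySem.List.enumerate_nil]
    rw [hfold, ih, step_snoc nc hn xs x]

-- ===== VERDICT =====
theorem assign_ranks_spec : Claim_equal_assign_ranks := by
  intro population0 ncores _ hpre
  unfold Pre_assign_ranks at hpre
  unfold Spec_assign_ranks assign_ranks_alt
  rw [if_neg (by omega : ¬ ncores < 1)]
  exact fold_eq ncores hpre population0
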